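-- pv_equiv track=rewrite | github.com/WilliamsLiang/DeepModelforIR | model/dssm.py | get_tokenindex
-- ===== SOURCE A (Python) =====
-- def get_tokenindex(token):
--     index = 0
--     for i in range(len(token)):
--         s = token[i]
--         if(s=="#"):
--             index = index + 27*(27**i)
--         else:
--             value = ord(s)-96
--             index = index + value*(27**i)
--     return index
-- ===== SOURCE B (Python) =====
-- def get_tokenindex(token):
--     index = 0
--     for s in reversed(token):
--         index = index * 27 + (27 if s == "#" else ord(s) - 96)
--     return index
-- ===== Notes on version B (the rewrite author's own statement) =====
-- stated objective: simpler
-- what changed: Replaces the forward loop that sums value*(27**i) for each position with Horner's method over the reversed string, keeping one accumulator and never computing a power.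
import Mathlib
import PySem

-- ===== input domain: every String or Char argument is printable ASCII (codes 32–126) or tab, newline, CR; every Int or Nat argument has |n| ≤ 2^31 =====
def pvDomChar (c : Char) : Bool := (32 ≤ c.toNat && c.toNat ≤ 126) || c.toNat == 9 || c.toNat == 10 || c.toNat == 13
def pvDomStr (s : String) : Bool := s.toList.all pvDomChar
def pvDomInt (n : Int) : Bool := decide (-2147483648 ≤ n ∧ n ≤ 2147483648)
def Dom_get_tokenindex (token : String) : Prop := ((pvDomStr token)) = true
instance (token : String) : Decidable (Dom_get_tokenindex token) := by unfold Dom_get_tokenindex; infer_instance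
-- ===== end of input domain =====

-- B replaces the per-position 27**i scaling sum with Horner's method over the reversed string (simpler, no powers).

-- ===== PORT A =====
-- A: index = 0; for i in range(len(token)): s = token[i]; branch on '#', add value*(27**i).
def get_tokenindex (token : String) : Int :=
  (token.toList.zipIdx).foldl
    (fun index p =>
      let s := p.1
      let i := p.2
      if s = '#' then
        index + 27 * ((27 : Int) ^ i)
      else
        let value : Int := (s.toNat : Int) - 96
        index + value * ((27 : Int) ^ i)) 0

-- ===== PORT B =====
-- B: Horner accumulator over reversed(token).
def get_tokenindex_alt (token : String) : Int :=
  token.toList.reverse.foldl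
    (fun index s => index * 27 + (if s = '#' then 27 else (s.toNat : Int) - 96)) 0

-- ===== PRECONDITION & SPEC =====
def Spec_get_tokenindex (token : String) (out : Int) : Prop := out = get_tokenindex_alt token
instance (token : String) (out : Int) : Decidable (Spec_get_tokenindex token out) := by unfold Spec_get_tokenindex; infer_instance

-- ===== CLAIM (what is proved, stated in full; the proofs are below) =====
def Claim_equal_get_tokenindex : Prop := ∀ (token : String), Dom_get_tokenindex token → Spec_get_tokenindex token (get_tokenindex token)

-- ===== LEMMAS AND PROOFS =====

def pvVal (c : Char) : Int := if c = '#' then 27 else (c.toNat : Int) - 96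

def pvPoly : List Char → Int
  | [] => 0
  | c :: cs => pvVal c + 27 * pvPoly cs

theorem pv_foldA (l : List Char) (k : Nat) (acc : Int) :
    (l.zipIdx k).foldl
      (fun index p =>
        let s := p.1
        let i := p.2
        if s = '#' then
          index + 27 * ((27 : Int) ^ i)
        else
          let value : Int := (s.toNat : Int) - 96
          index + value * ((27 : Int) ^ i)) acc
      = acc + (27 : Int) ^ k * pvPoly l := by
  induction l generalizing k acc with
  | nil => simp [pvPoly]
  | cons c cs ih =>
    simp only [List.zipIdx_cons, List.foldl_cons]
    rw [ih]
    by_cases h : c = '#' <;>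
      simp [h, pvPoly, pvVal, pow_succ] <;> ring

theorem pv_foldB (l : List Char) :
    l.foldr (fun s index => index * 27 + (if s = '#' then 27 else (s.toNat : Int) - 96)) 0
      = pvPoly l := by
  induction l with
  | nil => rfl
  | cons c cs ih =>
    simp only [List.foldr_cons, ih, pvPoly, pvVal]
    ring

-- ===== VERDICT (by name: the statement is the Claim_ definition above) =====
theorem get_tokenindex_spec : Claim_equal_get_tokenindex := by
  intro token _
  unfold Spec_get_tokenindex get_tokenindex get_tokenindex_alt
  rw [List.foldl_reverse, pv_foldB, pv_foldA]
  simp
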